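-- pv_equiv track=rewrite | github.com/jeromechecketts/hangman | hangman_fnc.py | string_guess_with_underscore
-- ===== SOURCE A (Python) =====
-- def string_guess_with_underscore(word):
--     visualization = ""
--     for letter in word:
--         if letter == " ":
--             visualization += (" ")
--         else:
--             visualization += ("_")
--     return visualization
-- ===== SOURCE B (Python) =====
-- def string_guess_with_underscore(word):
--     return " ".join("_" * len(segment) for segment in word.split(" "))
-- ===== Notes on version B (the rewrite author's own statement) =====
-- stated objective: idiomatic
-- what changed: Replaces the per-character classification loop with repeated string concatenation by a split-on-space / mask-each-segment / join decomposition (each segment becomes underscores of its length, spaces reinserted by the join).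
import Mathlib
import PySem

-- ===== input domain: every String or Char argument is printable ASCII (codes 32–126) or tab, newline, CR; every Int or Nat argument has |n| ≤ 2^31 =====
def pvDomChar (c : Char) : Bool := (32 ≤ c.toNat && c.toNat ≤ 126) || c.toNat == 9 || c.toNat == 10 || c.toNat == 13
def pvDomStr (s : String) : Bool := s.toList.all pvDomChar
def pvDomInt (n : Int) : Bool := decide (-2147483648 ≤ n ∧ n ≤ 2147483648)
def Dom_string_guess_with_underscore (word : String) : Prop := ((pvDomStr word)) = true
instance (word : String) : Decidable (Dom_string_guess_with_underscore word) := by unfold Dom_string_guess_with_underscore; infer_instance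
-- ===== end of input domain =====

-- B rebuilds the mask by splitting on " ", mapping each segment to underscores of its length, and rejoining with " " (idiomatic decomposition instead of a per-character classification loop).


-- ===== PORT A =====
-- visualization = ""; for letter in word: append " " or "_" ; ported over List Char with a foldl
def string_guess_with_underscore (word : String) : String :=
  String.ofList (word.toList.foldl (fun acc c => acc ++ [if c == ' ' then ' ' else '_']) [])

-- ===== PORT B =====
-- " ".join("_" * len(segment) for segment in word.split(" "))
def string_guess_with_underscore_alt (word : String) : String :=
  String.ofList (PySem.Chars.join [' ']
    ((PySem.Chars.splitOn word.toList [' ']).map (fun seg => List.replicate seg.length '_')))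

-- ===== PRECONDITION & SPEC =====
def Spec_string_guess_with_underscore (word : String) (out : String) : Prop := out = string_guess_with_underscore_alt word
instance (word : String) (out : String) : Decidable (Spec_string_guess_with_underscore word out) := by unfold Spec_string_guess_with_underscore; infer_instance

-- ===== CLAIM (what is proved, stated in full; the proofs are below) =====
def Claim_equal_string_guess_with_underscore : Prop := ∀ (word : String), Dom_string_guess_with_underscore word → Spec_string_guess_with_underscore word (string_guess_with_underscore word)

-- ===== LEMMAS AND PROOFS =====

-- reference split on a single space, structural form of splitOn s [' ']
def split1 : List Char → List (List Char)
  | [] => [[]]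
  | c :: rest => if c = ' ' then [] :: split1 rest else (split1 rest).modifyHead (c :: ·)

def maskChar (c : Char) : Char := if c == ' ' then ' ' else '_'

theorem split1_ne_nil (s : List Char) : split1 s ≠ [] := by
  cases s with
  | nil => simp [split1]
  | cons c rest =>
    simp only [split1]
    split_ifs with h
    · simp
    · cases hr : split1 rest with
      | nil => exact absurd hr (split1_ne_nil rest)
      | cons a t => simp [List.modifyHead]

theorem splitOn_go_eq : ∀ (fuel : Nat) (l cur : List Char) (acc : List (List Char)),
    l.length ≤ fuel →
    PySem.Chars.splitOn.go [' '] fuel l cur acc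
      = acc.reverse ++ (split1 l).modifyHead (cur.reverse ++ ·) := by
  intro fuel
  induction fuel with
  | zero =>
    intro l cur acc h
    have : l = [] := by cases l <;> simp_all
    subst this
    simp [PySem.Chars.splitOn.go, split1, List.modifyHead]
  | succ n ih =>
    intro l cur acc h
    cases l with
    | nil => simp [PySem.Chars.splitOn.go, split1, List.modifyHead]
    | cons c rest =>
      have hn : rest.length ≤ n := by simpa using Nat.le_of_succ_le_succ h
      by_cases hc : c = ' '
      · subst hc
        have hpre : List.isPrefixOf [' '] (' ' :: rest) = true := by
          simp [List.isPrefixOf]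
        rw [PySem.Chars.splitOn.go]
        simp only [hpre, if_true]
        rw [show List.drop [' '].length (' ' :: rest) = rest from rfl]
        rw [ih rest [] (cur.reverse :: acc) (by simpa using hn)]
        cases hr : split1 rest with
        | nil => exact absurd hr (split1_ne_nil rest)
        | cons a t => simp [split1, List.modifyHead, hr]
      · have hpre : List.isPrefixOf [' '] (c :: rest) = false := by
          simp [List.isPrefixOf]
          intro hh; exact absurd hh.symm hc
        rw [PySem.Chars.splitOn.go]
        simp only [hpre, Bool.false_eq_true, if_false]
        rw [ih rest (c :: cur) acc hn]
        cases hr : split1 rest with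
        | nil => exact absurd hr (split1_ne_nil rest)
        | cons a t => simp [split1, hc, List.modifyHead, hr]

theorem splitOn_space (s : List Char) : PySem.Chars.splitOn s [' '] = split1 s := by
  unfold PySem.Chars.splitOn
  rw [splitOn_go_eq (s.length + 1) s [] [] (Nat.le_succ _)]
  cases hr : split1 s with
  | nil => exact absurd hr (split1_ne_nil s)
  | cons a t => simp [List.modifyHead]

theorem foldl_mask (s : List Char) : ∀ acc : List Char,
    s.foldl (fun a c => a ++ [if c == ' ' then ' ' else '_']) acc = acc ++ s.map maskChar := by
  induction s with
  | nil => intro acc; simp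
  | cons c rest ih =>
    intro acc
    simp only [List.foldl_cons, ih, List.map_cons, maskChar, List.append_assoc,
      List.cons_append, List.nil_append]

theorem join_cons_head (sep : List Char) (x : Char) (p : List Char) (ps : List (List Char)) :
    PySem.Chars.join sep ((x :: p) :: ps) = x :: PySem.Chars.join sep (p :: ps) := by
  cases ps with
  | nil => rw [PySem.Chars.join_singleton, PySem.Chars.join_singleton]
  | cons q r => rw [PySem.Chars.join_cons_cons, PySem.Chars.join_cons_cons]; simp

theorem join_split1 (s : List Char) :
    PySem.Chars.join [' '] ((split1 s).map (fun seg => List.replicate seg.length '_'))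
      = s.map maskChar := by
  induction s with
  | nil => simp [split1, PySem.Chars.join_singleton]
  | cons c rest ih =>
    cases hr : split1 rest with
    | nil => exact absurd hr (split1_ne_nil rest)
    | cons a t =>
      rw [hr] at ih
      by_cases hc : c = ' '
      · subst hc
        have h1 : split1 (' ' :: rest) = [] :: a :: t := by simp [split1, hr]
        rw [h1, List.map_cons, List.map_cons, PySem.Chars.join_cons_cons]
        have h3 : List.replicate a.length '_' :: List.map (fun seg => List.replicate seg.length '_') t
            = List.map (fun seg => List.replicate seg.length '_') (a :: t) := rfl
        rw [h3, ih]
        simp [maskChar]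
      · have h1 : split1 (c :: rest) = (c :: a) :: t := by
          simp [split1, hc, hr, List.modifyHead]
        rw [h1, List.map_cons]
        have h2 : List.replicate (c :: a).length '_' = '_' :: List.replicate a.length '_' := rfl
        rw [h2, join_cons_head]
        have h3 : List.replicate a.length '_' :: List.map (fun seg => List.replicate seg.length '_') t
            = List.map (fun seg => List.replicate seg.length '_') (a :: t) := rfl
        rw [h3, ih]
        simp [maskChar, hc]

-- ===== VERDICT (by name: the statement is the Claim_ definition above) =====
theorem string_guess_with_underscore_spec : Claim_equal_string_guess_with_underscore := by
  intro word _
  unfold Spec_string_guess_with_underscore string_guess_with_underscore string_guess_with_underscore_alt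
  rw [splitOn_space, join_split1, foldl_mask]
  simp
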